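-- pv_equiv track=rewrite | github.com/dongchen-coder/locapo | npc_version/mr_curve_scripts/ul_mr.py | get_lease
-- ===== SOURCE A (Python) =====
-- def get_cache_size(dist,lease):
-- 	s = 0
-- 	for x,freq in dist.items():
-- 		if(x < lease):
-- 			s += (lease-x)*freq
-- 	return lease - s
--
-- def get_lease(dist,cachesize,rimax):
-- 	l=0
-- 	pwr = 8
-- 	while True:
-- 		candidate = l+10**pwr
-- 		if get_cache_size(dist,candidate) > cachesize:
-- 			pwr -=1
-- 			if(pwr < 0):
-- 				return l
-- 		else:
-- 			l = candidate
-- 			if(l > rimax):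
-- 				return rimax
-- ===== SOURCE B (Python) =====
-- def get_lease(dist, cachesize, rimax):
--     keys = sorted(dist)
--     n = len(keys)
--     pre = [(0, 0)]
--     c = s = 0
--     for x in keys:
--         f = dist[x]
--         c += f
--         s += x * f
--         pre.append((c, s))
--
--     def size(lease):
--         lo, hi = 0, n
--         while lo < hi:
--             m = (lo + hi) // 2
--             if keys[m] < lease:
--                 lo = m + 1
--             else:
--                 hi = m
--         cnt, sm = pre[lo]
--         return lease - (lease * cnt - sm)
--
--     l = 0
--     for pwr in (8, 7, 6, 5, 4, 3, 2, 1, 0):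
--         while True:
--             cand = l + 10 ** pwr
--             if size(cand) > cachesize:
--                 break
--             l = cand
--             if l > rimax:
--                 return rimax
--     return l
-- ===== Notes on version B (the rewrite author's own statement) =====
-- stated objective: alternative
-- what changed: B sorts the keys once, builds prefix sums of freq and x*freq, and answers each get_cache_size query with a binary search over the prefix sums instead of a full scan of the dict per search step; it trades a one-off O(n log n) preprocessing for O(log n) queries.
import Mathlib
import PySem

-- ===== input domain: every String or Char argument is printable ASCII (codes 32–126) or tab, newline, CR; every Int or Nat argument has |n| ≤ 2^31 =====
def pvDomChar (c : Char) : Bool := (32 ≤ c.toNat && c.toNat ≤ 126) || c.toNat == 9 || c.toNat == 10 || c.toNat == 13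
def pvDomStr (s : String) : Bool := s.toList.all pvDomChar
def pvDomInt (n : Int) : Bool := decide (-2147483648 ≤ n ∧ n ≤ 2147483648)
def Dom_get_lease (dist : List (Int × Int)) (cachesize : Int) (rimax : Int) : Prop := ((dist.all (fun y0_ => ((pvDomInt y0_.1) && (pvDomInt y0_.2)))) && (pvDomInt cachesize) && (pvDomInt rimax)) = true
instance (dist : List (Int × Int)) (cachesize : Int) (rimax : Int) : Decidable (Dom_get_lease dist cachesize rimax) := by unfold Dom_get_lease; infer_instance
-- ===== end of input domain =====

-- B sorts the keys once, keeps prefix sums of freq and x*freq, and answers each cache-size query by binary search over the prefix sums instead of rescanning the whole dict (an alternative algorithm; not measured faster).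


-- ===== PORT A =====
-- get_cache_size(dist, lease): s-loop over dist.items(), return lease - s
def aCacheSize (d : PySem.Dict Int Int) (lease : Int) : Int :=
  lease - d.items.foldl (fun s p => if p.1 < lease then s + (lease - p.1) * p.2 else s) 0

-- the 'while True' of get_lease, state (l, pwr); pwr < 0 is the pwr = 0 match arm
def aLoop (d : PySem.Dict Int Int) (cachesize rimax : Int) (l : Int) (pwr : Nat) : Int :=
  let candidate := l + 10 ^ pwr
  if aCacheSize d candidate > cachesize then
    match pwr with
    | 0 => l
    | p + 1 => aLoop d cachesize rimax l p
  else
    if candidate > rimax then rimax else aLoop d cachesize rimax candidate pwr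
termination_by ((rimax - l).toNat, pwr)
decreasing_by
  · exact Prod.Lex.right _ (Nat.lt_succ_self p)
  · refine Prod.Lex.left _ _ ?_
    have hp : (1 : Int) ≤ 10 ^ pwr := one_le_pow₀ (by norm_num)
    omega

def get_lease (dist : List (Int × Int)) (cachesize : Int) (rimax : Int) : Int :=
  aLoop (PySem.Dict.ofList dist) cachesize rimax 0 8

-- ===== PORT B =====
-- the pre-building for-loop of Source B: state ((c, s), pre); pre.append = acc ++ [·]
def bPrefix (d : PySem.Dict Int Int) (ks : List Int) : List (Int × Int) :=
  (ks.foldl (fun (st : (Int × Int) × List (Int × Int)) x =>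
      let f := d.getD x 0
      let c := st.1.1 + f
      let s := st.1.2 + x * f
      ((c, s), st.2 ++ [(c, s)])) ((0, 0), [(0, 0)])).2

-- the hand-written bisect_left loop of Source B; keys[m] is exact: every call has m < hi ≤ len keys,
-- and (lo+hi)//2 on the nonnegative lo, hi is Nat division
def bBl (ks : List Int) (lease : Int) (lo hi : Nat) : Nat :=
  if h : lo < hi then
    let m := (lo + hi) / 2
    if ks.getD m 0 < lease then bBl ks lease (m + 1) hi else bBl ks lease lo m
  else lo
termination_by hi - lo
decreasing_by all_goals omega

-- size(lease) of Source B; pre[lo] is exact: lo ≤ n = len keys < len pre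
def bSize (ks : List Int) (pre : List (Int × Int)) (n : Nat) (lease : Int) : Int :=
  let lo := bBl ks lease 0 n
  let p := pre.getD lo (0, 0)
  lease - (lease * p.1 - p.2)

-- the inner 'while True' of Source B: .inl r = return r from get_lease, .inr l = break with this l
def bInner (ks : List Int) (pre : List (Int × Int)) (n : Nat) (cachesize rimax : Int)
    (pwr : Nat) (l : Int) : Int ⊕ Int :=
  let cand := l + 10 ^ pwr
  if bSize ks pre n cand > cachesize then Sum.inr l
  else if cand > rimax then Sum.inl rimax
  else bInner ks pre n cachesize rimax pwr cand
termination_by (rimax - l).toNat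
decreasing_by
  have hp : (1 : Int) ≤ 10 ^ pwr := one_le_pow₀ (by norm_num)
  omega

-- the outer 'for pwr in (8,...,0)' of Source B
def bGo (ks : List Int) (pre : List (Int × Int)) (n : Nat) (cachesize rimax : Int)
    (ps : List Nat) (l : Int) : Int :=
  match ps with
  | [] => l
  | p :: rest =>
    match bInner ks pre n cachesize rimax p l with
    | Sum.inl r => r
    | Sum.inr l' => bGo ks pre n cachesize rimax rest l'

def get_lease_alt (dist : List (Int × Int)) (cachesize : Int) (rimax : Int) : Int :=
  let d := PySem.Dict.ofList dist
  let ks := PySem.List.sorted d.keys (fun x => x) false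
  let pre := bPrefix d ks
  bGo ks pre ks.length cachesize rimax [8, 7, 6, 5, 4, 3, 2, 1, 0] 0

-- ===== PRECONDITION & SPEC =====
def Spec_get_lease (dist : List (Int × Int)) (cachesize : Int) (rimax : Int) (out : Int) : Prop := out = get_lease_alt dist cachesize rimax
instance (dist : List (Int × Int)) (cachesize : Int) (rimax : Int) (out : Int) : Decidable (Spec_get_lease dist cachesize rimax out) := by unfold Spec_get_lease; infer_instance

-- ===== CLAIM (what is proved, stated in full; the proofs are below) =====
def Claim_equal_get_lease : Prop := ∀ (dist : List (Int × Int)) (cachesize : Int) (rimax : Int), Dom_get_lease dist cachesize rimax → Spec_get_lease dist cachesize rimax (get_lease dist cachesize rimax)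

-- ===== LEMMAS AND PROOFS =====

-- [8,...,0] as a recursive list, for relating A's pwr decrement to B's for-loop
def pwrList : Nat → List Nat
  | 0 => [0]
  | p + 1 => (p + 1) :: pwrList p

-- pure form of the prefix list bPrefix builds
def preAux (d : PySem.Dict Int Int) : List Int → Int → Int → List (Int × Int)
  | [], _, _ => []
  | x :: t, c0, s0 =>
    (c0 + d.getD x 0, s0 + x * d.getD x 0) :: preAux d t (c0 + d.getD x 0) (s0 + x * d.getD x 0)

theorem bPrefix_aux (d : PySem.Dict Int Int) : ∀ (ks : List Int) (cs : Int × Int) (acc : List (Int × Int)),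
    (ks.foldl (fun (st : (Int × Int) × List (Int × Int)) x =>
      let f := d.getD x 0
      let c := st.1.1 + f
      let s := st.1.2 + x * f
      ((c, s), st.2 ++ [(c, s)])) (cs, acc)).2 = acc ++ preAux d ks cs.1 cs.2 := by
  intro ks
  induction ks with
  | nil => intro cs acc; simp [preAux]
  | cons x t ih =>
    intro cs acc
    simp only [List.foldl_cons]
    rw [ih]
    simp [preAux]

theorem bPrefix_eq (d : PySem.Dict Int Int) (ks : List Int) :
    bPrefix d ks = (0, 0) :: preAux d ks 0 0 := by
  unfold bPrefix
  rw [bPrefix_aux d ks (0, 0) [(0, 0)]]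
  rfl

theorem preAux_getD (d : PySem.Dict Int Int) : ∀ (ks : List Int) (c0 s0 : Int) (r : Nat), r < ks.length →
    (preAux d ks c0 s0).getD r (0, 0) =
      (c0 + ((ks.take (r + 1)).map (fun x => d.getD x 0)).sum,
       s0 + ((ks.take (r + 1)).map (fun x => x * d.getD x 0)).sum) := by
  intro ks
  induction ks with
  | nil => intro _ _ r hr; simp at hr
  | cons x t ih =>
    intro c0 s0 r hr
    cases r with
    | zero => simp [preAux]
    | succ q =>
      simp only [preAux, List.getD_cons_succ]
      rw [ih _ _ q (by simpa using hr)]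
      simp [List.take_succ_cons, add_assoc]

theorem pre_getD (d : PySem.Dict Int Int) (ks : List Int) (r : Nat) (hr : r ≤ ks.length) :
    (bPrefix d ks).getD r (0, 0) =
      (((ks.take r).map (fun x => d.getD x 0)).sum,
       ((ks.take r).map (fun x => x * d.getD x 0)).sum) := by
  rw [bPrefix_eq]
  cases r with
  | zero => simp
  | succ q =>
    rw [List.getD_cons_succ, preAux_getD d ks 0 0 q (by omega)]
    simp

theorem bBl_spec (ks : List Int) (lease : Int) (hsort : List.Pairwise (· ≤ ·) ks) :
    ∀ (n lo hi : Nat), hi - lo = n → lo ≤ hi → hi ≤ ks.length →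
    (∀ j (hj : j < ks.length), j < lo → ks[j] < lease) →
    (∀ j (hj : j < ks.length), hi ≤ j → lease ≤ ks[j]) →
    bBl ks lease lo hi ≤ ks.length ∧
    (∀ j (hj : j < ks.length), j < bBl ks lease lo hi → ks[j] < lease) ∧
    (∀ j (hj : j < ks.length), bBl ks lease lo hi ≤ j → lease ≤ ks[j]) := by
  have mono : ∀ (i j : Nat) (hi : i < ks.length) (hj : j < ks.length), i ≤ j → ks[i] ≤ ks[j] := by
    intro i j hi hj hij
    rcases Nat.eq_or_lt_of_le hij with h | h
    · subst h; exact le_refl _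
    · exact List.pairwise_iff_getElem.mp hsort i j hi hj h
  intro n
  induction n using Nat.strong_induction_on with
  | _ n IH =>
    intro lo hi hn hlh hhi hbelow habove
    by_cases hlt : lo < hi
    · have hm1 : lo ≤ (lo + hi) / 2 := by omega
      have hm2 : (lo + hi) / 2 < hi := by omega
      have hmlen : (lo + hi) / 2 < ks.length := by omega
      rw [bBl]
      simp only [dif_pos hlt]
      rw [List.getD_eq_getElem ks 0 hmlen]
      by_cases hkm : ks[(lo + hi) / 2] < lease
      · rw [if_pos hkm]
        refine IH (hi - ((lo + hi) / 2 + 1)) (by omega) _ _ rfl (by omega) hhi ?_ habove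
        intro j hj hjlt
        exact lt_of_le_of_lt (mono j ((lo + hi) / 2) hj hmlen (by omega)) hkm
      · rw [if_neg hkm]
        rw [not_lt] at hkm
        refine IH ((lo + hi) / 2 - lo) (by omega) _ _ rfl (by omega) (by omega) hbelow ?_
        intro j hj hmj
        exact le_trans hkm (mono ((lo + hi) / 2) j hmlen hj hmj)
    · rw [bBl]
      simp only [dif_neg hlt]
      exact ⟨by omega, fun j hj hjlo => hbelow j hj hjlo, fun j hj hloj => habove j hj (by omega)⟩

theorem sum_linear (lease : Int) (f : Int → Int) : ∀ l : List Int,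
    (l.map (fun x => (lease - x) * f x)).sum
      = lease * (l.map f).sum - (l.map (fun x => x * f x)).sum := by
  intro l
  induction l with
  | nil => simp
  | cons y t ih => simp only [List.map_cons, List.sum_cons, ih]; ring

theorem sum_ite_split (lease : Int) (f : Int → Int) (ks : List Int) (r : Nat) (hr : r ≤ ks.length)
    (h1 : ∀ j (hj : j < ks.length), j < r → ks[j] < lease)
    (h2 : ∀ j (hj : j < ks.length), r ≤ j → lease ≤ ks[j]) :
    (ks.map (fun x => if x < lease then (lease - x) * f x else 0)).sum
      = lease * ((ks.take r).map f).sum - ((ks.take r).map (fun x => x * f x)).sum := by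
  have htake : ∀ x ∈ ks.take r, x < lease := by
    intro x hx
    obtain ⟨j, hj, hxe⟩ := List.mem_iff_getElem.mp hx
    have hjr : j < r := by simp [List.length_take] at hj; omega
    have hjlen : j < ks.length := by simp [List.length_take] at hj; omega
    rw [← hxe, List.getElem_take]
    exact h1 j hjlen hjr
  have hdrop : ∀ x ∈ ks.drop r, ¬ x < lease := by
    intro x hx
    obtain ⟨j, hj, hxe⟩ := List.mem_iff_getElem.mp hx
    have hjlen : r + j < ks.length := by simp [List.length_drop] at hj; omega
    rw [← hxe, List.getElem_drop]
    exact not_lt.mpr (h2 (r + j) hjlen (by omega))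
  conv_lhs => rw [← List.take_append_drop r ks]
  rw [List.map_append, List.sum_append]
  rw [List.map_congr_left (fun x hx => if_pos (htake x hx)),
      List.map_congr_left (fun x hx => if_neg (hdrop x hx))]
  have hz : ((ks.drop r).map (fun _ => (0 : Int))).sum = 0 := by simp
  rw [hz, add_zero, sum_linear]

theorem bSize_eq_aCacheSize (d : PySem.Dict Int Int) (hnd : d.keys.Nodup)
    (ks : List Int) (hks : ks = PySem.List.sorted d.keys (fun x => x) false) (lease : Int) :
    bSize ks (bPrefix d ks) ks.length lease = aCacheSize d lease := by
  have hperm : ks.Perm d.keys := hks ▸ PySem.List.sorted_perm d.keys (fun x => x) false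
  have hsort : List.Pairwise (· ≤ ·) ks := by
    subst hks
    simpa using PySem.List.sorted_pairwise d.keys (fun x => x)
  obtain ⟨hr1, hr2, hr3⟩ := bBl_spec ks lease hsort (ks.length - 0) 0 ks.length rfl (by omega) le_rfl
    (fun j hj hjlt => by omega) (fun j hj hge => by omega)
  have hA : aCacheSize d lease
      = lease - (ks.map (fun x => if x < lease then (lease - x) * d.getD x 0 else 0)).sum := by
    unfold aCacheSize
    rw [PySem.Dict.items_eq_map_keys d hnd 0, List.foldl_map]
    simp only
    have hfun : (fun (s : Int) (k : Int) => if k < lease then s + (lease - k) * d.getD k 0 else s)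
        = fun s k => s + (if k < lease then (lease - k) * d.getD k 0 else 0) := by
      funext s k
      split_ifs <;> simp
    rw [hfun, PySem.List.foldl_add, zero_add,
        ← (hperm.map (fun x => if x < lease then (lease - x) * d.getD x 0 else 0)).sum_eq]
  rw [hA]
  unfold bSize
  simp only
  rw [pre_getD d ks (bBl ks lease 0 ks.length) hr1,
      sum_ite_split lease (fun x => d.getD x 0) ks (bBl ks lease 0 ks.length) hr1 hr2 hr3]

theorem loop_eq (d : PySem.Dict Int Int) (ks : List Int) (pre : List (Int × Int)) (n : Nat)
    (cachesize rimax : Int)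
    (hsz : ∀ c, bSize ks pre n c = aCacheSize d c) :
    ∀ (l : Int) (pwr : Nat),
      aLoop d cachesize rimax l pwr = bGo ks pre n cachesize rimax (pwrList pwr) l := by
  intro l pwr
  fun_induction aLoop d cachesize rimax l pwr with
  | case1 l cand hc =>
    simp only [pwrList, bGo]
    rw [bInner]
    simp only [hsz]
    rw [if_pos hc]
  | case2 l p cand hc ih =>
    rw [ih]
    conv_rhs => rw [pwrList]
    simp only [bGo]
    rw [bInner]
    simp only [hsz]
    rw [if_pos hc]
  | case3 l pwr cand hc hr =>
    obtain ⟨t, ht⟩ : ∃ t, pwrList pwr = pwr :: t := by cases pwr <;> exact ⟨_, rfl⟩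
    rw [ht]
    simp only [bGo]
    rw [bInner]
    simp only [hsz]
    rw [if_neg hc, if_pos hr]
  | case4 l pwr cand hc hr ih =>
    rw [ih]
    obtain ⟨t, ht⟩ : ∃ t, pwrList pwr = pwr :: t := by cases pwr <;> exact ⟨_, rfl⟩
    rw [ht]
    have hb : bInner ks pre n cachesize rimax pwr l = bInner ks pre n cachesize rimax pwr (l + 10 ^ pwr) := by
      conv_lhs => rw [bInner]
      simp only [hsz]
      rw [if_neg hc, if_neg hr]
    simp only [bGo]
    rw [hb]

-- ===== VERDICT (by name: the statement is the Claim_ definition above) =====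
theorem get_lease_spec : Claim_equal_get_lease := by
  intro dist cachesize rimax _
  unfold Spec_get_lease
  unfold get_lease get_lease_alt
  simp only
  rw [show ([8, 7, 6, 5, 4, 3, 2, 1, 0] : List Nat) = pwrList 8 from rfl]
  exact loop_eq (PySem.Dict.ofList dist) _ _ _ cachesize rimax
    (fun c => bSize_eq_aCacheSize (PySem.Dict.ofList dist) (PySem.Dict.nodup_keys_ofList dist) _ rfl c) 0 8
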